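-- pv_equiv track=rewrite | github.com/pypi-data/pypi-mirror-248 | packages/screenshot-ocr/screenshot_ocr-0.3.0-py3-none-any.whl/screenshot_ocr/trivia.py | get_number_and_question
-- ===== SOURCE A (Python) =====
-- def get_number_and_question(value: str) -> tuple[int | None, str]:
--     """Parse the question number and question text.
--
--     Args:
--         value: The raw text from the screenshot.
--
--     Returns:
--         A tuple containing the question number and text.
--     """
--     key_question = "question"
--     number = None
--     text = ""
--     for line in value.splitlines():
--         line_lower = line.casefold()
--
--         if line.strip() and number is None and key_question in line_lower:
--             maybe_number = line_lower.replace(key_question, "").strip()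
--             if maybe_number in ["il", "i1", "l1", "li", "1i", "1l", "ii"]:
--                 number = 11
--             else:
--                 number = int(maybe_number)
--             continue
--
--         if not line.strip():
--             continue
--         text += " " + line.strip()
--
--     text = text.strip()
--     return number, text
-- ===== SOURCE B (Python) =====
-- def get_number_and_question(value: str) -> tuple[int | None, str]:
--     """Parse the question number and question text (filter/find/join decomposition)."""
--     lines = [ln for ln in value.splitlines() if ln.strip()]
--     q = next((i for i, ln in enumerate(lines) if "question" in ln.casefold()), None)
--     if q is None:
--         number = None
--     else:
--         rest = lines[q].casefold().replace("question", "").strip()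
--         number = 11 if rest in {"il", "i1", "l1", "li", "1i", "1l", "ii"} else int(rest)
--     text = " ".join(ln.strip() for i, ln in enumerate(lines) if i != q)
--     return number, text
-- ===== Notes on version B (the rewrite author's own statement) =====
-- stated objective: alternative
-- what changed: A's single stateful loop (number-slot plus a growing ' '-prefixed text accumulator, stripped at the end) is replaced by a declarative decomposition: filter the non-blank lines once, locate the first 'question' line with a single next/enumerate scan, parse its remainder, and build the text with one ' '.join over all other lines.
import Mathlib
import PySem

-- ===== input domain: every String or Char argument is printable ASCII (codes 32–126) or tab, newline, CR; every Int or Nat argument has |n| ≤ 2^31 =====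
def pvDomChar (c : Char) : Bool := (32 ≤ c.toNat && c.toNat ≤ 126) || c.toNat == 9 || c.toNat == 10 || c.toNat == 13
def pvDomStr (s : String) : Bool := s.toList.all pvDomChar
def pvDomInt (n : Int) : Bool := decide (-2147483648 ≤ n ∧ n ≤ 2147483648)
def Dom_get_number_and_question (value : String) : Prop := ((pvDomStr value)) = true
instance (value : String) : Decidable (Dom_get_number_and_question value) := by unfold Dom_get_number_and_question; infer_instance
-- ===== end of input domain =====

-- B replaces A's single accumulating loop by a filter/first-index-scan/join decomposition; objective: alternative.
-- On the ASCII input domain Dom_, Python's str.casefold coincides with str.lower, ported as PySem.Chars.lower (exact there).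

-- ===== PORT A =====
-- the OCR-misread table ["il", "i1", "l1", "li", "1i", "1l", "ii"] (→ 11)
def pvSpecialA : List (List Char) :=
  ["il".toList, "i1".toList, "l1".toList, "li".toList, "1i".toList, "1l".toList, "ii".toList]

-- one iteration of A's for-loop; state = (number, text)
def pvAStep (st : Option Int × List Char) (line : List Char) : Option Int × List Char :=
  let line_lower := PySem.Chars.lower line
  if PySem.Chars.strip line ≠ [] ∧ st.1 = none ∧
      PySem.Chars.isIn "question".toList line_lower then
    let maybe_number := PySem.Chars.strip (PySem.Chars.replace line_lower "question".toList [])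
    if maybe_number ∈ pvSpecialA then (some 11, st.2)
    else (some ((PySem.Int.ofChars? maybe_number).getD 0), st.2)  -- int(); none = ValueError, excluded by Pre_
  else if PySem.Chars.strip line = [] then st
  else (st.1, st.2 ++ ' ' :: PySem.Chars.strip line)

def get_number_and_question (value : String) : Option Int × String :=
  let r := (PySem.Chars.splitlines value.toList).foldl pvAStep (none, [])
  (r.1, String.ofList (PySem.Chars.strip r.2))

-- ===== PORT B =====
-- Source B's set literal {"il", "i1", "l1", "li", "1i", "1l", "ii"}
def pvSpecialB : PySem.Set (List Char) :=
  PySem.Set.ofList ["il".toList, "i1".toList, "l1".toList, "li".toList, "1i".toList, "1l".toList, "ii".toList]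

def get_number_and_question_alt (value : String) : Option Int × String :=
  let lines := (PySem.Chars.splitlines value.toList).filter
      (fun ln => PySem.Chars.strip ln ≠ [])
  let q : Option Int :=
    ((PySem.List.enumerate lines).find?
        (fun p => PySem.Chars.isIn "question".toList (PySem.Chars.lower p.2))).map (·.1)
  let number : Option Int :=
    match q with
    | none => none
    | some i =>
        let rest := PySem.Chars.strip
          (PySem.Chars.replace (PySem.Chars.lower (PySem.List.pyGetD lines i [])) "question".toList [])
        if pvSpecialB.contains rest then some 11
        else some ((PySem.Int.ofChars? rest).getD 0)  -- int(); none = ValueError, excluded by Pre_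
  let text := PySem.Chars.join [' ']
      (((PySem.List.enumerate lines).filter (fun p => decide (q ≠ some p.1))).map
        (fun p => PySem.Chars.strip p.2))
  (number, String.ofList text)

-- ===== PRECONDITION & SPEC =====
-- Pre_ excludes exactly the inputs where A raises ValueError: those whose first non-blank
-- line containing "question" has a remainder that is neither in the OCR table nor readable by int().
def Pre_get_number_and_question (value : String) : Prop :=
  (((PySem.Chars.splitlines value.toList).find?
      (fun l => PySem.Chars.strip l ≠ [] &&
                PySem.Chars.isIn "question".toList (PySem.Chars.lower l))).all
    (fun l =>
      let r := PySem.Chars.strip (PySem.Chars.replace (PySem.Chars.lower l) "question".toList [])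
      r ∈ ["il".toList, "i1".toList, "l1".toList, "li".toList, "1i".toList, "1l".toList, "ii".toList]
        || (PySem.Int.ofChars? r).isSome)) = true
instance (value : String) : Decidable (Pre_get_number_and_question value) := by
  unfold Pre_get_number_and_question; infer_instance

def pvWitness_get_number_and_question : String := "Question 3\n\nWhat is it?\nA thing."

def Spec_get_number_and_question (value : String) (out : Option Int × String) : Prop :=
  out = get_number_and_question_alt value
instance (value : String) (out : Option Int × String) : Decidable (Spec_get_number_and_question value out) := by
  unfold Spec_get_number_and_question; infer_instance

-- ===== CLAIM (what is proved, stated in full; the proofs are below) =====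
def Claim_equal_get_number_and_question : Prop :=
  ∀ (value : String), Dom_get_number_and_question value → Pre_get_number_and_question value →
    Spec_get_number_and_question value (get_number_and_question value)

-- ===== LEMMAS AND PROOFS =====

-- abbreviations used only by the proofs
def pvNB (l : List Char) : Bool := decide (PySem.Chars.strip l ≠ [])
def pvP (l : List Char) : Bool := PySem.Chars.isIn "question".toList (PySem.Chars.lower l)
def pvChunk (l : List Char) : List Char := ' ' :: PySem.Chars.strip l
def pvParse (l : List Char) : Option Int :=
  let mn := PySem.Chars.strip (PySem.Chars.replace (PySem.Chars.lower l) "question".toList [])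
  if mn ∈ pvSpecialA then some 11 else some ((PySem.Int.ofChars? mn).getD 0)

theorem pvAStep_blank (st : Option Int × List Char) (line : List Char)
    (h : PySem.Chars.strip line = []) : pvAStep st line = st := by
  simp [pvAStep, h]

theorem pvFoldl_filter_nb (S : List (List Char)) (st : Option Int × List Char) :
    S.foldl pvAStep st = (S.filter pvNB).foldl pvAStep st := by
  induction S generalizing st with
  | nil => rfl
  | cons l S ih =>
    by_cases h : PySem.Chars.strip l = []
    · simp [pvNB, h, pvAStep_blank _ _ h, ih]
    · simp [pvNB, h, ih]

theorem pvFold_some (L : List (List Char)) (t : List Char) (n : Int)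
    (hL : ∀ l ∈ L, PySem.Chars.strip l ≠ []) :
    L.foldl pvAStep (some n, t) = (some n, t ++ L.flatMap pvChunk) := by
  induction L generalizing t with
  | nil => simp
  | cons l L ih =>
    have hl := hL l (by simp)
    have hrest : ∀ l ∈ L, PySem.Chars.strip l ≠ [] := fun x hx => hL x (by simp [hx])
    simp only [List.foldl_cons, List.flatMap_cons]
    rw [show pvAStep (some n, t) l = (some n, t ++ pvChunk l) by simp [pvAStep, hl, pvChunk]]
    rw [ih _ hrest]
    simp

theorem pvFold_none (L : List (List Char)) (t : List Char)
    (hL : ∀ l ∈ L, PySem.Chars.strip l ≠ []) :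
    L.foldl pvAStep (none, t) =
      match L.findIdx? pvP with
      | none => (none, t ++ L.flatMap pvChunk)
      | some k => (pvParse (L.getD k []), t ++ (L.eraseIdx k).flatMap pvChunk) := by
  induction L generalizing t with
  | nil => simp
  | cons l L ih =>
    have hl := hL l (by simp)
    have hrest : ∀ x ∈ L, PySem.Chars.strip x ≠ [] := fun x hx => hL x (by simp [hx])
    by_cases hp : pvP l = true
    · have hstep : pvAStep (none, t) l = (pvParse l, t) := by
        unfold pvAStep pvParse
        rw [if_pos ⟨hl, rfl, hp⟩]
        exact (apply_ite (fun n : Option Int => (n, t)) _ _ _).symm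
      obtain ⟨n, hn⟩ : ∃ n, pvParse l = some n := by
        unfold pvParse; dsimp only; split
        · exact ⟨_, rfl⟩
        · exact ⟨_, rfl⟩
      simp only [List.foldl_cons, hstep]
      rw [hn, pvFold_some L t n hrest, List.findIdx?_cons, if_pos hp]
      simp [List.eraseIdx, ← hn]
    · have hstep : pvAStep (none, t) l = (none, t ++ pvChunk l) := by
        unfold pvAStep
        rw [if_neg (by rintro ⟨-, -, hq⟩; exact hp hq), if_neg hl]
        rfl
      simp only [List.foldl_cons, hstep, List.findIdx?_cons, hp]
      rw [ih _ hrest]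
      rcases L.findIdx? pvP with _ | k
      · simp
      · simp [List.eraseIdx_cons_succ]

-- B-side: first index via enumerate+find?
theorem pvFind_enum (L : List (List Char)) (s : Int) :
    ((PySem.List.enumerate L s).find? (fun p => pvP p.2)).map (fun p => p.1)
      = (L.findIdx? pvP).map (fun k => s + (k : Int)) := by
  induction L generalizing s with
  | nil => simp [PySem.List.enumerate]
  | cons l L ih =>
    rw [PySem.List.enumerate_cons, List.findIdx?_cons]
    by_cases hp : pvP l = true
    · simp [hp]
    · simp only [List.find?_cons, hp]
      simp only [Bool.false_eq_true, if_false]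
      rw [ih]
      rcases L.findIdx? pvP with _ | k
      · simp
      · simp; ring

theorem pvMap_strip_enum (L : List (List Char)) (s : Int) :
    (PySem.List.enumerate L s).map (fun p => PySem.Chars.strip p.2)
      = L.map PySem.Chars.strip := by
  have h : (fun p : Int × List Char => PySem.Chars.strip p.2)
      = (PySem.Chars.strip ∘ fun p : Int × List Char => p.2) := rfl
  rw [h, ← List.map_map, PySem.List.map_snd_enumerate]

-- B-side: filtering out no index keeps everything
theorem pvFilter_enum_none (L : List (List Char)) (s : Int) :
    ((PySem.List.enumerate L s).filter (fun p => decide ((none : Option Int) ≠ some p.1))).map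
        (fun p => PySem.Chars.strip p.2) = L.map PySem.Chars.strip := by
  have : ((PySem.List.enumerate L s).filter (fun p => decide ((none : Option Int) ≠ some p.1)))
      = PySem.List.enumerate L s := by
    rw [List.filter_eq_self]; intro a _; simp
  rw [this, pvMap_strip_enum]

theorem pvEnum_ge (L : List (List Char)) (s : Int) (p : Int × List Char)
    (hp : p ∈ PySem.List.enumerate L s) : s ≤ p.1 := by
  induction L generalizing s with
  | nil => simp [PySem.List.enumerate] at hp
  | cons l L ih =>
    rw [PySem.List.enumerate_cons] at hp
    rcases List.mem_cons.mp hp with h1 | h1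
    · simp [h1]
    · have := ih (s + 1) h1; omega

-- B-side: filtering out the found index erases it
theorem pvFilter_enum_some (L : List (List Char)) (s : Int) (k : Nat) (hk : k < L.length) :
    ((PySem.List.enumerate L s).filter (fun p => decide (some (s + (k : Int)) ≠ some p.1))).map
        (fun p => PySem.Chars.strip p.2) = (L.eraseIdx k).map PySem.Chars.strip := by
  induction L generalizing s k with
  | nil => simp at hk
  | cons l L ih =>
    rw [PySem.List.enumerate_cons]
    cases k with
    | zero =>
      simp only [List.filter_cons]
      have h1 : (decide (some (s + ((0:Nat) : Int)) ≠ some s)) = false := by simp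
      rw [h1]
      simp only [Bool.false_eq_true, if_false]
      have h2 : ((PySem.List.enumerate L (s+1)).filter (fun p => decide (some (s + ((0:Nat):Int)) ≠ some p.1)))
          = PySem.List.enumerate L (s+1) := by
        rw [List.filter_eq_self]
        intro a ha
        have := pvEnum_ge L (s+1) a ha
        simp; omega
      rw [h2, pvMap_strip_enum]
      simp [List.eraseIdx]
    | succ m =>
      simp only [List.filter_cons]
      have h1 : (decide (some (s + ((m+1:Nat) : Int)) ≠ some s)) = true := by
        simp; omega
      rw [h1, if_pos rfl]
      have h2 : s + ((m+1:Nat) : Int) = (s+1) + (m : Int) := by push_cast; ring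
      rw [List.map_cons, List.eraseIdx_cons_succ, List.map_cons]
      congr 1
      rw [h2, ih (s+1) m (by simpa using hk)]

-- ---- strip / join facts ----
def pvGood (X : List Char) : Prop :=
  X ≠ [] ∧ (∀ c, X.head? = some c → PySem.Chars.isspace c = false)
    ∧ (∀ c, X.getLast? = some c → PySem.Chars.isspace c = false)

theorem pvHead_dropWhile (p : Char → Bool) (l : List Char) (c : Char)
    (h : (l.dropWhile p).head? = some c) : p c = false := by
  induction l with
  | nil => simp at h
  | cons a l ih =>
    by_cases hpa : p a = true
    · rw [List.dropWhile_cons, if_pos hpa] at h; exact ih h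
    · rw [List.dropWhile_cons, if_neg hpa] at h
      simp at h; subst h; simpa using hpa

theorem pvGood_strip (l : List Char) (h : PySem.Chars.strip l ≠ []) :
    pvGood (PySem.Chars.strip l) := by
  refine ⟨h, ?_, ?_⟩
  · intro c hc
    -- head of strip l = head of lstrip l, which is a head of a dropWhile
    have hpre : PySem.Chars.strip l <+: PySem.Chars.lstrip l := by
      unfold PySem.Chars.strip PySem.Chars.rstrip
      rw [← List.reverse_suffix]
      simpa using List.dropWhile_suffix (l := (PySem.Chars.lstrip l).reverse) PySem.Chars.isspace
    obtain ⟨t, ht⟩ := hpre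
    have : (PySem.Chars.lstrip l).head? = some c := by
      rw [← ht, List.head?_append, hc]; rfl
    exact pvHead_dropWhile _ l c this
  · intro c hc
    unfold PySem.Chars.strip PySem.Chars.rstrip at hc
    rw [List.getLast?_eq_head?_reverse, List.reverse_reverse] at hc
    exact pvHead_dropWhile _ _ c hc

theorem pvStrip_good (X : List Char) (h : pvGood X) : PySem.Chars.strip X = X := by
  obtain ⟨hne, hh, hl⟩ := h
  have h1 : PySem.Chars.lstrip X = X := by
    unfold PySem.Chars.lstrip
    cases X with
    | nil => simp at hne
    | cons a X =>
      rw [List.dropWhile_cons, if_neg]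
      simp [hh a rfl]
  unfold PySem.Chars.strip
  rw [h1]
  unfold PySem.Chars.rstrip
  cases hrev : X.reverse with
  | nil => simp_all
  | cons a R =>
    have ha : X.getLast? = some a := by rw [List.getLast?_eq_head?_reverse, hrev]; rfl
    rw [List.dropWhile_cons, if_neg (by simp [hl a ha]), ← hrev, List.reverse_reverse]

theorem pvGood_append (A B : List Char) (hA : pvGood A) (hB : pvGood B) :
    pvGood (A ++ ' ' :: B) := by
  obtain ⟨hAne, hAh, hAl⟩ := hA
  obtain ⟨hBne, hBh, hBl⟩ := hB
  refine ⟨by simp [hAne], ?_, ?_⟩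
  · intro c hc
    rw [List.head?_append] at hc
    cases hA' : A.head? with
    | none => simp [List.head?_eq_none_iff] at hA'; exact absurd hA' hAne
    | some a => rw [hA'] at hc; simp at hc; subst hc; exact hAh _ hA'
  · intro c hc
    rw [List.getLast?_append] at hc
    have : (' ' :: B).getLast? = some (B.getLast?.getD ' ') := List.getLast?_cons
    rw [this] at hc
    cases hB' : B.getLast? with
    | none => simp [List.getLast?_eq_none_iff] at hB'; exact absurd hB' hBne
    | some b => simp [hB'] at hc; subst hc; exact hBl _ hB'

theorem pvGood_join (M : List (List Char)) (hne : M ≠ [])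
    (h : ∀ m ∈ M, pvGood m) : pvGood (PySem.Chars.join [' '] M) := by
  induction M with
  | nil => simp at hne
  | cons a M ih =>
    cases M with
    | nil => rw [PySem.Chars.join_singleton]; exact h a (by simp)
    | cons b M =>
      rw [PySem.Chars.join_cons_cons]
      have := ih (by simp) (fun m hm => h m (List.mem_cons_of_mem a hm))
      rw [List.append_assoc]
      exact pvGood_append _ _ (h a (by simp)) this

theorem pvFlatMap_chunk_eq (M : List (List Char)) (hne : M ≠ []) :
    M.flatMap pvChunk = ' ' :: PySem.Chars.join [' '] (M.map PySem.Chars.strip) := by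
  induction M with
  | nil => simp at hne
  | cons a M ih =>
    cases M with
    | nil => simp [pvChunk, PySem.Chars.join_singleton]
    | cons b M =>
      rw [List.flatMap_cons, ih (by simp)]
      simp [pvChunk, PySem.Chars.join_cons_cons]

theorem pvStrip_cons_space (X : List Char) :
    PySem.Chars.strip (' ' :: X) = PySem.Chars.strip X := by
  unfold PySem.Chars.strip PySem.Chars.lstrip
  rw [List.dropWhile_cons, if_pos (by decide)]

theorem pvStrip_flatMap (M : List (List Char))
    (hM : ∀ m ∈ M, PySem.Chars.strip m ≠ []) :
    PySem.Chars.strip (M.flatMap pvChunk)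
      = PySem.Chars.join [' '] (M.map PySem.Chars.strip) := by
  cases hne : M with
  | nil => simp [PySem.Chars.join_nil]; rfl
  | cons a M' =>
    rw [← hne, pvFlatMap_chunk_eq M (by simp [hne]), pvStrip_cons_space]
    apply pvStrip_good
    apply pvGood_join _ (by simp [hne])
    intro m hm
    rw [List.mem_map] at hm
    obtain ⟨x, hx, rfl⟩ := hm
    exact pvGood_strip x (hM x hx)

theorem pvFind_enum0_none (L : List (List Char)) (h : L.findIdx? pvP = none) :
    ((PySem.List.enumerate L 0).find? (fun p => pvP p.2)).map (fun p => p.1)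
      = none := by
  rw [pvFind_enum, h]; simp

theorem pvFind_enum0_some (L : List (List Char)) (k : Nat) (h : L.findIdx? pvP = some k) :
    ((PySem.List.enumerate L 0).find? (fun p => pvP p.2)).map (fun p => p.1)
      = some ((k : Int)) := by
  rw [pvFind_enum, h]; simp

theorem pvFilter_enum_some0 (L : List (List Char)) (k : Nat) (hk : k < L.length) :
    ((PySem.List.enumerate L 0).filter (fun p => decide (some ((k : Int)) ≠ some p.1))).map
        (fun p => PySem.Chars.strip p.2) = (L.eraseIdx k).map PySem.Chars.strip := by
  have h := pvFilter_enum_some L 0 k hk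
  simpa using h

theorem pvContainsB (r : List Char) :
    pvSpecialB.contains r = decide (r ∈ pvSpecialA) := by
  by_cases h : r ∈ pvSpecialA
  · rw [decide_eq_true h]
    exact (PySem.Set.contains_iff _ _).mpr ((PySem.Set.mem_ofList _ _).mpr h)
  · rw [decide_eq_false h]
    by_contra hc
    simp only [Bool.not_eq_false] at hc
    exact h ((PySem.Set.mem_ofList _ _).mp ((PySem.Set.contains_iff _ _).mp hc))

-- ===== VERDICT (by name: the statement is the Claim_ definition above) =====
theorem get_number_and_question_spec : Claim_equal_get_number_and_question := by
  intro value hdom hpre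
  unfold Spec_get_number_and_question
  unfold get_number_and_question get_number_and_question_alt
  simp only []
  rw [show (fun ln : List Char => decide (PySem.Chars.strip ln ≠ [])) = pvNB from rfl]
  rw [show (fun p : Int × List Char => PySem.Chars.isIn "question".toList (PySem.Chars.lower p.2))
        = (fun p : Int × List Char => pvP p.2) from rfl]
  rw [pvFoldl_filter_nb]
  set L := (PySem.Chars.splitlines value.toList).filter pvNB with hLdef
  have hLmem : ∀ l ∈ L, PySem.Chars.strip l ≠ [] := by
    intro l hl
    have := List.of_mem_filter hl
    simpa [pvNB] using this
  rw [pvFold_none L [] hLmem]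
  cases hidx : L.findIdx? pvP with
  | none =>
    rw [pvFind_enum0_none L hidx]
    dsimp only
    rw [pvFilter_enum_none]
    simp only [List.nil_append]
    rw [pvStrip_flatMap L hLmem]
  | some k =>
    have hk : k < L.length := (List.findIdx?_eq_some_iff_findIdx_eq.mp hidx).1
    rw [pvFind_enum0_some L k hidx]
    dsimp only
    have hE : ∀ m ∈ L.eraseIdx k, PySem.Chars.strip m ≠ [] :=
      fun m hm => hLmem m (List.mem_of_mem_eraseIdx hm)
    rw [pvFilter_enum_some0 L k hk]
    simp only [List.nil_append]
    rw [pvStrip_flatMap _ hE]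
    have hget : PySem.List.pyGetD L ((k : Int)) [] = L.getD k [] := by
      simp [List.getD]
    rw [hget, pvContainsB]
    unfold pvParse
    by_cases hmem :
        PySem.Chars.strip (PySem.Chars.replace (PySem.Chars.lower (L.getD k [])) "question".toList []) ∈ pvSpecialA
    · simp only [decide_eq_true hmem, if_pos hmem]
      simp
    · simp only [decide_eq_false hmem, if_neg hmem]
      simp
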